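-- pv_equiv track=rewrite | github.com/noghte/omim-kinase | kinsnps_allinfo.py | extract_sequence_info
-- ===== SOURCE A (Python) =====
-- def extract_sequence_info(sequence: str) -> tuple:
--     """Extract kinase domain and flanking positions from sequence."""
--     flanking_positions = []
--     kinase_domain = ""
--     kinase_start = -1
--     kinase_end = -1
--     pos = 1
--     in_flanking = False
--     start_pos = -1
--
--     for i, char in enumerate(sequence):
--         if char == '(':
--             in_flanking = True
--             start_pos = pos
--             if kinase_domain:
--                 kinase_end = pos - 1
--         elif char == ')':
--             in_flanking = False
--             flanking_positions.append({"start": start_pos, "end": pos-1})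
--             if kinase_start == -1:
--                 kinase_start = pos
--         else:
--             if in_flanking:
--                 pos += 1
--             else:
--                 if kinase_start == -1:
--                     kinase_start = pos
--                 kinase_domain += char
--                 pos += 1
--
--     if kinase_end == -1:
--         kinase_end = pos - 1
--
--     return flanking_positions, kinase_domain, kinase_start, kinase_end
-- ===== SOURCE B (Python) =====
-- def extract_sequence_info(sequence: str) -> tuple:
--     """Extract kinase domain and flanking positions from sequence."""
--     # Pass 1: annotate each character with the position it sees and the
--     # in-flanking flag in force when it is scanned; positions advance only
--     # on non-parenthesis characters.
--     annotated = []
--     pos = 1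
--     in_flanking = False
--     for ch in sequence:
--         annotated.append((ch, pos, in_flanking))
--         if ch == '(':
--             in_flanking = True
--         elif ch == ')':
--             in_flanking = False
--         else:
--             pos += 1
--     total = pos
--
--     # Flanking groups: each ')' closes at the position of the last '('.
--     flanking_positions = []
--     start = -1
--     for ch, p, f in annotated:
--         if ch == '(':
--             start = p
--         elif ch == ')':
--             flanking_positions.append({"start": start, "end": p - 1})
--
--     # Kinase domain: every non-parenthesis character scanned outside parens.
--     kinase_domain = "".join(ch for ch, _, f in annotated
--                             if ch != '(' and ch != ')' and not f)
--
--     # Kinase start: position at the first ')' or first outside character.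
--     kinase_start = -1
--     for ch, p, f in annotated:
--         if ch == ')' or (ch != '(' and not f):
--             kinase_start = p
--             break
--
--     # Kinase end: position just before the last '(' preceded by a domain
--     # character; defaults to the last assigned position.
--     kinase_end = total - 1
--     seen_domain = False
--     for ch, p, f in annotated:
--         if ch == '(':
--             if seen_domain:
--                 kinase_end = p - 1
--         elif ch != ')' and not f:
--             seen_domain = True
--
--     return flanking_positions, kinase_domain, kinase_start, kinase_end
-- ===== Notes on version B (the rewrite author's own statement) =====
-- stated objective: alternative
-- what changed: Replaces A's single stateful loop that updates all four results at once by a first annotation pass recording (char, position, in_flanking) per character, from which each of the four outputs is derived by its own independent pass.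
import Mathlib
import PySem

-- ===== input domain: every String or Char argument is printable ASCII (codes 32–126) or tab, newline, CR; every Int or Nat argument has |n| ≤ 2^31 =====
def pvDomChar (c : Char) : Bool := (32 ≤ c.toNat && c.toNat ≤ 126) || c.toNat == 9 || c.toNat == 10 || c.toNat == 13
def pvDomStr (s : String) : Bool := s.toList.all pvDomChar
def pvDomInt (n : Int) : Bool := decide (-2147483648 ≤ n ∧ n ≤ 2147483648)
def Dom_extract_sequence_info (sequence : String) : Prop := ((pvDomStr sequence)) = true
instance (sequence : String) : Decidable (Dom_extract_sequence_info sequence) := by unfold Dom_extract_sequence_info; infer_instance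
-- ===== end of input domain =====

-- B replaces A's single stateful loop by an annotation pass plus four independent derivation passes (alternative decomposition, same cost).


-- ===== PORT A =====
-- A's loop, state = (flanking_positions, kinase_domain, kinase_start, kinase_end, pos, in_flanking, start_pos);
-- the base case performs A's final 'if kinase_end == -1' fix-up.
def aGo : List Char → List (List (String × Int)) → String → Int → Int → Int → Bool → Int →
    (List (List (String × Int))) × String × Int × Int
  | [], fp, dom, ks, ke, pos, _, _ =>
      (fp, dom, ks, if ke = -1 then pos - 1 else ke)
  | c :: cs, fp, dom, ks, ke, pos, inflank, startp =>
      if c = '(' then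
        aGo cs fp dom ks (if dom ≠ "" then pos - 1 else ke) pos true pos
      else if c = ')' then
        aGo cs (fp ++ [[("start", startp), ("end", pos - 1)]]) dom
          (if ks = -1 then pos else ks) ke pos false startp
      else
        if inflank then
          aGo cs fp dom ks ke (pos + 1) true startp
        else
          aGo cs fp (dom.push c) (if ks = -1 then pos else ks) ke (pos + 1) false startp

def extract_sequence_info (sequence : String) : (List (List (String × Int))) × String × Int × Int :=
  aGo sequence.toList [] "" (-1) (-1) 1 false (-1)

-- ===== PORT B =====
-- pass 1: annotate each char with its position and the in_flanking flag; also return the final pos.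
def bAnnot : List Char → Int → Bool → List (Char × Int × Bool) × Int
  | [], pos, _ => ([], pos)
  | c :: cs, pos, f =>
      let rest :=
        if c = '(' then bAnnot cs pos true
        else if c = ')' then bAnnot cs pos false
        else bAnnot cs (pos + 1) f
      ((c, pos, f) :: rest.1, rest.2)

-- flanking groups: each ')' closes at the position recorded at the last '('.
def bFlank : List (Char × Int × Bool) → Int → List (List (String × Int))
  | [], _ => []
  | (c, p, _) :: rest, start =>
      if c = '(' then bFlank rest p
      else if c = ')' then [("start", start), ("end", p - 1)] :: bFlank rest start
      else bFlank rest start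

-- kinase domain: every non-paren char scanned outside parens (the "".join comprehension).
def bDomainChars (ann : List (Char × Int × Bool)) : List Char :=
  ann.filterMap (fun x => if x.1 ≠ '(' ∧ x.1 ≠ ')' ∧ x.2.2 = false then some x.1 else none)

-- kinase start: position at the first ')' or first outside char.
def bStart : List (Char × Int × Bool) → Int
  | [] => -1
  | (c, p, f) :: rest =>
      if c = ')' ∨ (c ≠ '(' ∧ f = false) then p else bStart rest

-- kinase end: overwritten at each '(' preceded by a domain char; init = total - 1.
def bEnd : List (Char × Int × Bool) → Int → Bool → Int
  | [], ke, _ => ke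
  | (c, p, f) :: rest, ke, seen =>
      if c = '(' then bEnd rest (if seen then p - 1 else ke) seen
      else if c ≠ ')' ∧ f = false then bEnd rest ke true
      else bEnd rest ke seen

def extract_sequence_info_alt (sequence : String) : (List (List (String × Int))) × String × Int × Int :=
  let a := bAnnot sequence.toList 1 false
  (bFlank a.1 (-1), String.ofList (bDomainChars a.1), bStart a.1, bEnd a.1 (a.2 - 1) false)

-- ===== PRECONDITION & SPEC =====
def Spec_extract_sequence_info (sequence : String) (out : (List (List (String × Int))) × String × Int × Int) : Prop := out = extract_sequence_info_alt sequence
instance (sequence : String) (out : (List (List (String × Int))) × String × Int × Int) : Decidable (Spec_extract_sequence_info sequence out) := by unfold Spec_extract_sequence_info; infer_instance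

-- ===== CLAIM (what is proved, stated in full; the proofs are below) =====
def Claim_equal_extract_sequence_info : Prop := ∀ (sequence : String), Dom_extract_sequence_info sequence → Spec_extract_sequence_info sequence (extract_sequence_info sequence)

-- ===== LEMMAS AND PROOFS =====

lemma str_nil (s : String) : s ++ String.ofList [] = s := by
  apply String.toList_inj.mp
  simp

lemma str_push (s : String) (c : Char) (cs : List Char) :
    s ++ String.ofList (c :: cs) = (s.push c) ++ String.ofList cs := by
  apply String.toList_inj.mp
  simp

lemma push_ne_empty (s : String) (c : Char) : s.push c ≠ "" := by
  intro h
  have := congrArg String.toList h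
  simp at this

-- positions in the annotation and the final pos are ≥ the starting pos.
lemma bAnnot_pos_ge (l : List Char) (pos : Int) (f : Bool) :
    (∀ x ∈ (bAnnot l pos f).1, pos ≤ x.2.1) ∧ pos ≤ (bAnnot l pos f).2 := by
  induction l generalizing pos f with
  | nil => simp [bAnnot]
  | cons c cs ih =>
    by_cases h1 : c = '(' <;> by_cases h2 : c = ')' <;>
      simp only [bAnnot, h1, h2, if_pos, if_neg, List.mem_cons] <;>
      constructor <;>
      first
      | (intro x hx
         rcases hx with rfl | hx
         · simp
         · first
           | exact (ih pos true).1 x hx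
           | exact (ih pos false).1 x hx
           | exact le_trans (by omega) ((ih (pos + 1) f).1 x hx))
      | exact (ih pos true).2
      | exact (ih pos false).2
      | exact le_trans (by omega) ((ih (pos + 1) f).2)

-- bEnd is either the identity on its init, or a constant ≥ 0 independent of the init.
lemma bEnd_cases (ann : List (Char × Int × Bool)) (hp : ∀ x ∈ ann, 1 ≤ x.2.1) :
    ∀ s : Bool, (∀ i, bEnd ann i s = i) ∨ (∃ v, 0 ≤ v ∧ ∀ i, bEnd ann i s = v) := by
  induction ann with
  | nil => intro s; left; intro i; rfl
  | cons x rest ih =>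
    obtain ⟨c, p, f⟩ := x
    have hp1 : 1 ≤ p := hp (c, p, f) (by simp)
    have hprest : ∀ x ∈ rest, 1 ≤ x.2.1 := fun x hx => hp x (by simp [hx])
    intro s
    by_cases h1 : c = '('
    · by_cases hs : s = true
      · subst hs
        rcases ih hprest true with h | ⟨v, hv0, hv⟩
        · right; exact ⟨p - 1, by omega, fun i => by simp [bEnd, h1, h]⟩
        · right; exact ⟨v, hv0, fun i => by simp [bEnd, h1, hv]⟩
      · have hs' : s = false := by cases s <;> simp_all
        subst hs'
        rcases ih hprest false with h | ⟨v, hv0, hv⟩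
        · left; intro i; simp [bEnd, h1, h]
        · right; exact ⟨v, hv0, fun i => by simp [bEnd, h1, hv]⟩
    · by_cases h2 : c ≠ ')' ∧ f = false
      · rcases ih hprest true with h | ⟨v, hv0, hv⟩
        · left; intro i; simp [bEnd, h1, h2, h]
        · right; exact ⟨v, hv0, fun i => by simp [bEnd, h1, h2, hv]⟩
      · rcases ih hprest s with h | ⟨v, hv0, hv⟩
        · left; intro i; simp [bEnd, h1, h2, h]
        · right; exact ⟨v, hv0, fun i => by simp [bEnd, h1, h2, hv]⟩

-- main invariant: A's loop from any state equals B's passes over the annotation.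
lemma main_inv (l : List Char) :
    ∀ (pos : Int) (inflank : Bool) (startp : Int)
      (fp : List (List (String × Int))) (dom : String) (ks ke : Int),
      1 ≤ pos →
      aGo l fp dom ks ke pos inflank startp =
        (fp ++ bFlank (bAnnot l pos inflank).1 startp,
         dom ++ String.ofList (bDomainChars (bAnnot l pos inflank).1),
         if ks = -1 then bStart (bAnnot l pos inflank).1 else ks,
         (if bEnd (bAnnot l pos inflank).1 ke (decide (dom ≠ "")) = -1
          then (bAnnot l pos inflank).2 - 1
          else bEnd (bAnnot l pos inflank).1 ke (decide (dom ≠ "")))) := by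
  induction l with
  | nil =>
    intro pos inflank startp fp dom ks ke hpos
    refine Prod.ext (by simp [bAnnot, bFlank, aGo]) (Prod.ext ?_ (Prod.ext ?_ ?_)) <;>
      simp [aGo, bAnnot, bFlank, bDomainChars, bStart, bEnd, str_nil]
  | cons c cs ih =>
    intro pos inflank startp fp dom ks ke hpos
    by_cases h1 : c = '('
    · subst h1
      have ha : aGo ('(' :: cs) fp dom ks ke pos inflank startp =
          aGo cs fp dom ks (if dom ≠ "" then pos - 1 else ke) pos true pos := by
        simp [aGo]
      have hb : bAnnot ('(' :: cs) pos inflank =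
          (('(', pos, inflank) :: (bAnnot cs pos true).1, (bAnnot cs pos true).2) := by
        simp [bAnnot]
      rw [ha, ih pos true pos fp dom ks (if dom ≠ "" then pos - 1 else ke) hpos, hb]
      refine Prod.ext (by simp [bFlank]) (Prod.ext ?_ (Prod.ext ?_ ?_))
      · simp [bDomainChars, List.filterMap_cons]
      · simp [bStart]
      · simp only [bEnd, if_pos rfl]
        by_cases hd : dom ≠ "" <;> simp [hd]
    · by_cases h2 : c = ')'
      · subst h2
        have ha : aGo (')' :: cs) fp dom ks ke pos inflank startp =
            aGo cs (fp ++ [[("start", startp), ("end", pos - 1)]]) dom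
              (if ks = -1 then pos else ks) ke pos false startp := by
          simp [aGo]
        have hb : bAnnot (')' :: cs) pos inflank =
            ((')', pos, inflank) :: (bAnnot cs pos false).1, (bAnnot cs pos false).2) := by
          simp [bAnnot]
        rw [ha, ih pos false startp (fp ++ [[("start", startp), ("end", pos - 1)]]) dom
              (if ks = -1 then pos else ks) ke hpos, hb]
        refine Prod.ext ?_ (Prod.ext ?_ (Prod.ext ?_ ?_))
        · simp [bFlank]
        · simp [bDomainChars, List.filterMap_cons]
        · by_cases hks : ks = -1
          · simp [hks, bStart, show pos ≠ -1 by omega]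
          · simp [hks]
        · simp [bEnd]
      · by_cases hf : inflank = true
        · subst hf
          have ha : aGo (c :: cs) fp dom ks ke pos true startp =
              aGo cs fp dom ks ke (pos + 1) true startp := by
            simp [aGo, h1, h2]
          have hb : bAnnot (c :: cs) pos true =
              ((c, pos, true) :: (bAnnot cs (pos + 1) true).1, (bAnnot cs (pos + 1) true).2) := by
            simp [bAnnot, h1, h2]
          rw [ha, ih (pos + 1) true startp fp dom ks ke (by omega), hb]
          refine Prod.ext ?_ (Prod.ext ?_ (Prod.ext ?_ ?_))
          · simp [bFlank, h1, h2]
          · simp [bDomainChars, List.filterMap_cons, h1, h2]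
          · simp [bStart, h1, h2]
          · simp [bEnd, h1, h2]
        · have hf' : inflank = false := by cases inflank <;> simp_all
          subst hf'
          have ha : aGo (c :: cs) fp dom ks ke pos false startp =
              aGo cs fp (dom.push c) (if ks = -1 then pos else ks) ke (pos + 1) false startp := by
            simp [aGo, h1, h2]
          have hb : bAnnot (c :: cs) pos false =
              ((c, pos, false) :: (bAnnot cs (pos + 1) false).1, (bAnnot cs (pos + 1) false).2) := by
            simp [bAnnot, h1, h2]
          rw [ha, ih (pos + 1) false startp fp (dom.push c) (if ks = -1 then pos else ks) ke
                (by omega), hb]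
          refine Prod.ext ?_ (Prod.ext ?_ (Prod.ext ?_ ?_))
          · simp [bFlank, h1, h2]
          · simp [bDomainChars, List.filterMap_cons, h1, h2, str_push]
          · by_cases hks : ks = -1
            · simp [hks, bStart, h1, h2, show pos ≠ -1 by omega]
            · simp [hks]
          · have hdec : decide (dom.push c ≠ "") = true := decide_eq_true (push_ne_empty dom c)
            simp [bEnd, h1, h2, hdec]

-- ===== VERDICT (by name: the statement is the Claim_ definition above) =====
theorem extract_sequence_info_spec : Claim_equal_extract_sequence_info := by
  intro seq _
  unfold Spec_extract_sequence_info extract_sequence_info extract_sequence_info_alt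
  rw [main_inv seq.toList 1 false (-1) [] "" (-1) (-1) (by omega)]
  have hge := bAnnot_pos_ge seq.toList 1 false
  have hs : (("" : String) ++ String.ofList (bDomainChars (bAnnot seq.toList 1 false).1)) =
      String.ofList (bDomainChars (bAnnot seq.toList 1 false).1) := String.toList_inj.mp (by simp)
  rcases bEnd_cases _ hge.1 false with h | ⟨v, hv0, hv⟩
  · simp [h, hs]
  · simp [hv, hs, show v ≠ -1 by omega]
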